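-- pv_equiv track=rewrite | github.com/ericmerle3789/Collatz-Junction-Theorem | scripts/research/r13_direct_n0.py | trial_factor
-- ===== SOURCE A (Python) =====
-- def trial_factor(n, limit=10**7):
--     """Factor n by trial division up to limit."""
--     if n <= 1:
--         return []
--     factors = []
--     for p in [2, 3]:
--         e = 0
--         while n % p == 0:
--             n //= p
--             e += 1
--         if e > 0:
--             factors.append((p, e))
--     p = 5
--     step = 2
--     while p * p <= n and p <= limit:
--         e = 0
--         while n % p == 0:
--             n //= p
--             e += 1
--         if e > 0:
--             factors.append((p, e))
--         p += step
--         step = 6 - step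
--     if n > 1:
--         factors.append((n, 1))
--     return factors
-- ===== SOURCE B (Python) =====
-- def trial_factor(n, limit=10**7):
--     """Factor n: strip 2 and 3, then divide by sieved primes up to min(isqrt(n), limit)."""
--     if n <= 1:
--         return []
--     factors = []
--     for p in (2, 3):
--         e = 0
--         while n % p == 0:
--             n //= p
--             e += 1
--         if e > 0:
--             factors.append((p, e))
--     bound = min(_isqrt(n), limit)
--     for p in _primes_upto(bound):
--         if p < 5:
--             continue
--         e = 0
--         while n % p == 0:
--             n //= p
--             e += 1
--         if e > 0:
--             factors.append((p, e))
--     if n > 1: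
--         factors.append((n, 1))
--     return factors
--
--
-- def _isqrt(n):
--     r = 0
--     while (r + 1) * (r + 1) <= n:
--         r += 1
--     return r
--
--
-- def _primes_upto(bound):
--     if bound < 2:
--         return []
--     is_p = [True] * (bound + 1)
--     is_p[0] = False
--     is_p[1] = False
--     i = 2
--     while i * i <= bound:
--         if is_p[i]:
--             j = i * i
--             while j <= bound:
--                 is_p[j] = False
--                 j += i
--         i += 1
--     return [k for k in range(2, bound + 1) if is_p[k]]
-- ===== Notes on version B (the rewrite author's own statement) =====
-- stated objective: alternative
-- what changed: A's dynamic 6k±1 wheel trial division (stop condition p*p <= n re-checked against the shrinking n) is replaced by computing bound = min(isqrt(n), limit) once after stripping the factors 2 and 3, generating all primes up to bound with a Sieve of Eratosthenes, and dividing those primes out in ascending order.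
import Mathlib
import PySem

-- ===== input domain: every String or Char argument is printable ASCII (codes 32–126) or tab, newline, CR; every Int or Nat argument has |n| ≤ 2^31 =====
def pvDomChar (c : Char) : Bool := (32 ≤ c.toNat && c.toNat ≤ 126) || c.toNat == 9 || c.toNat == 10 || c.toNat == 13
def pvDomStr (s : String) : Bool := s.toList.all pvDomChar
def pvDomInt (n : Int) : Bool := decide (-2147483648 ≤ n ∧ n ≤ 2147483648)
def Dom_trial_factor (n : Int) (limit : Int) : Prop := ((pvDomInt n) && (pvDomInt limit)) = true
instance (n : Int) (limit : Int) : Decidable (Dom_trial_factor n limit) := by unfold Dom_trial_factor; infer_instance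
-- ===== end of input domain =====

-- B replaces A's dynamic 6k±1 wheel trial division by a precomputed bound min(isqrt(n), limit)
-- and a Sieve of Eratosthenes prime list; equal return value (no argument is mutated); objective: alternative.

-- ===== PORT A =====
-- shared inner loop of BOTH Pythons (identical text in Source A and Source B): "while n % p == 0: n //= p; e += 1"
-- fuel n.toNat+1 suffices: n shrinks by a factor ≥ 2 each pass
def pyDivLoop (p : Int) : Nat → Int → Int → Int × Int
  | 0, n, e => (n, e)
  | fuel+1, n, e =>
    if PySem.Int.mod n p == 0 then pyDivLoop p fuel (PySem.Int.floordiv n p) (e + 1) else (n, e)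

-- one "divide p out of n completely, append (p,e) if e>0" step, shared text of both Pythons
def stepDiv (s : List (Int × Int) × Int) (p : Int) : List (Int × Int) × Int :=
  let r := pyDivLoop p (s.2.toNat + 1) s.2 0
  (if 0 < r.2 then s.1 ++ [(p, r.2)] else s.1, r.1)

-- A's wheel loop "while p*p <= n and p <= limit"; fuel n.toNat+1 suffices since p grows by ≥ 2
def wheelLoop (limit : Int) : Nat → List (Int × Int) × Int → Int → Int → List (Int × Int) × Int
  | 0, s, _, _ => s
  | fuel+1, s, p, step =>
    if p * p ≤ s.2 ∧ p ≤ limit then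
      wheelLoop limit fuel (stepDiv s p) (p + step) (6 - step)
    else s

def trial_factor (n : Int) (limit : Int) : List (Int × Int) :=
  if n ≤ 1 then []
  else
    let s := [(2 : Int), 3].foldl stepDiv ([], n)
    let s := wheelLoop limit (s.2.toNat + 1) s 5 2
    if 1 < s.2 then s.1 ++ [(s.2, 1)] else s.1

-- ===== PORT B =====
-- Source B's _isqrt: "r = 0; while (r+1)*(r+1) <= n: r += 1"; fuel n.toNat suffices
def isqrtLoop (n : Int) : Nat → Int → Int
  | 0, r => r
  | fuel+1, r => if (r + 1) * (r + 1) ≤ n then isqrtLoop n fuel (r + 1) else r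

def isqrtB (n : Int) : Int := isqrtLoop n n.toNat 0

-- Source B's inner marking loop "while j <= bound: is_p[j] = False; j += i"; fuel bound.toNat+1 suffices
def markLoop (bound i : Int) : Nat → Int → Array Bool → Array Bool
  | 0, _, arr => arr
  | fuel+1, j, arr =>
    if j ≤ bound then markLoop bound i fuel (j + i) (arr.set! j.toNat false) else arr

-- Source B's outer sieve loop "while i*i <= bound"; fuel bound.toNat+2 suffices
def sieveLoop (bound : Int) : Nat → Int → Array Bool → Array Bool
  | 0, _, arr => arr
  | fuel+1, i, arr =>
    if i * i ≤ bound then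
      sieveLoop bound fuel (i + 1)
        (if arr.getD i.toNat false then markLoop bound i (bound.toNat + 1) (i * i) arr else arr)
    else arr

-- Source B's _primes_upto (the indices touched are always within range, so getD/set! are exact)
def primes_upto (bound : Int) : List Int :=
  if bound < 2 then []
  else
    let arr := ((Array.replicate (bound.toNat + 1) true).set! 0 false).set! 1 false
    let arr := sieveLoop bound (bound.toNat + 2) 2 arr
    (PySem.List.pyRange 2 (bound + 1) 1).filter (fun k => arr.getD k.toNat false)

def trial_factor_alt (n : Int) (limit : Int) : List (Int × Int) :=
  if n ≤ 1 then []
  else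
    let s := [(2 : Int), 3].foldl stepDiv ([], n)
    let bound := min (isqrtB s.2) limit
    let s := (primes_upto bound).foldl (fun s p => if p < 5 then s else stepDiv s p) s
    if 1 < s.2 then s.1 ++ [(s.2, 1)] else s.1

-- ===== PRECONDITION & SPEC =====
def Spec_trial_factor (n : Int) (limit : Int) (out : List (Int × Int)) : Prop := out = trial_factor_alt n limit
instance (n : Int) (limit : Int) (out : List (Int × Int)) : Decidable (Spec_trial_factor n limit out) := by unfold Spec_trial_factor; infer_instance

-- ===== CLAIM (what is proved, stated in full; the proofs are below) =====
def Claim_equal_trial_factor : Prop := ∀ (n : Int) (limit : Int), Dom_trial_factor n limit → Spec_trial_factor n limit (trial_factor n limit)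

-- ===== LEMMAS AND PROOFS =====

-- the trailing "if n > 1: factors.append((n, 1))" of both programs
def pvFinish (s : List (Int × Int) × Int) : List (Int × Int) :=
  if 1 < s.2 then s.1 ++ [(s.2, 1)] else s.1

-- the candidates A's 6k±1 wheel enumerates, cut at b
def wheelCands (b : Int) : List Int :=
  (PySem.List.pyRange 5 (b + 1) 1).filter (fun c => c % 6 == 1 || c % 6 == 5)

theorem mem_wheelCands {b c : Int} :
    c ∈ wheelCands b ↔ (5 ≤ c ∧ c ≤ b ∧ (c % 6 = 1 ∨ c % 6 = 5)) := by
  unfold wheelCands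
  simp only [List.mem_filter, PySem.List.mem_pyRange_one, Bool.or_eq_true, beq_iff_eq]
  constructor
  · rintro ⟨⟨h1, h2⟩, h3 | h3⟩ <;> omega
  · rintro ⟨h1, h2, h3 | h3⟩
    · exact ⟨⟨h1, by omega⟩, Or.inl h3⟩
    · exact ⟨⟨h1, by omega⟩, Or.inr h3⟩

theorem pairwise_wheelCands (b : Int) : (wheelCands b).Pairwise (· < ·) := by
  exact (PySem.List.pairwise_lt_pyRange_one 5 (b+1)).filter _

-- ---- facts about the shared division loop ----

theorem pyDivLoop_spec {p : Int} (hp : 2 ≤ p) :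
    ∀ (fuel : Nat) (n e : Int), 1 ≤ n → n.toNat < fuel →
      1 ≤ (pyDivLoop p fuel n e).1 ∧ (pyDivLoop p fuel n e).1 ∣ n ∧
        ¬ (p ∣ (pyDivLoop p fuel n e).1) := by
  intro fuel
  induction fuel with
  | zero => intro n e h1 h2; omega
  | succ f ih =>
    intro n e h1 h2
    by_cases hdvd : p ∣ n
    · have hmod : PySem.Int.mod n p = 0 := (PySem.Int.mod_eq_zero_iff_dvd n p).2 hdvd
      have hfd : PySem.Int.floordiv n p = n / p := PySem.Int.floordiv_eq_ediv_of_pos (by omega)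
      have hge : p ≤ n := Int.le_of_dvd (by omega) hdvd
      have h1' : 1 ≤ n / p := by
        have := Int.ediv_mul_cancel hdvd
        nlinarith [Int.ediv_nonneg (by omega : (0:Int) ≤ n) (by omega : (0:Int) ≤ p)]
      have hlt : n / p < n := by nlinarith [Int.ediv_mul_cancel hdvd]
      have hstep : pyDivLoop p (f+1) n e = pyDivLoop p f (n / p) (e + 1) := by
        simp [pyDivLoop, hmod, hfd]
      rw [hstep]
      obtain ⟨a, b, c⟩ := ih (n / p) (e + 1) h1' (by omega)
      have hdd : n / p ∣ n := ⟨p, (Int.ediv_mul_cancel hdvd).symm⟩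
      exact ⟨a, b.trans hdd, c⟩
    · have hmod : ¬ PySem.Int.mod n p = 0 := fun h => hdvd ((PySem.Int.mod_eq_zero_iff_dvd n p).1 h)
      simp [pyDivLoop, hmod, h1, dvd_refl, hdvd]

theorem stepDiv_spec {p n : Int} (hp : 2 ≤ p) (hn : 1 ≤ n) (acc : List (Int × Int)) :
    1 ≤ (stepDiv (acc, n) p).2 ∧ (stepDiv (acc, n) p).2 ∣ n ∧ ¬ (p ∣ (stepDiv (acc, n) p).2) := by
  obtain ⟨a, b, c⟩ := pyDivLoop_spec hp (n.toNat + 1) n 0 hn (by omega)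
  exact ⟨a, b, c⟩

theorem stepDiv_noop {p n : Int} (hp : 2 ≤ p) (hn : 1 ≤ n) (hnd : ¬ (p ∣ n))
    (acc : List (Int × Int)) : stepDiv (acc, n) p = (acc, n) := by
  have hmod : ¬ PySem.Int.mod n p = 0 := fun h => hnd ((PySem.Int.mod_eq_zero_iff_dvd n p).1 h)
  simp [stepDiv, pyDivLoop, hmod]

theorem stepDiv_self {q : Int} (hq : 2 ≤ q) (acc : List (Int × Int)) :
    stepDiv (acc, q) q = (acc ++ [(q, 1)], 1) := by
  have hmod : PySem.Int.mod q q = 0 := (PySem.Int.mod_eq_zero_iff_dvd q q).2 dvd_rfl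
  have hfd : PySem.Int.floordiv q q = 1 := by
    rw [PySem.Int.floordiv_eq_ediv_of_pos (by omega)]
    exact Int.ediv_self (by omega)
  have hmod1 : ¬ PySem.Int.mod 1 q = 0 := by
    intro h
    have := (PySem.Int.mod_eq_zero_iff_dvd 1 q).1 h
    have := Int.le_of_dvd one_pos this
    omega
  have hfuel : q.toNat + 1 = (q.toNat - 1) + 1 + 1 := by omega
  rw [stepDiv, hfuel]
  simp [pyDivLoop, hmod, hfd, hmod1]

-- dividing 1 by anything ≥ 2 does nothing
theorem foldl_stepDiv_one {C : List Int} (h2 : ∀ c ∈ C, 2 ≤ c) (acc : List (Int × Int)) :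
    C.foldl stepDiv (acc, 1) = (acc, 1) := by
  induction C with
  | nil => rfl
  | cons c C ih =>
    have hc := h2 c (List.mem_cons_self ..)
    have : stepDiv (acc, 1) c = (acc, 1) := by
      apply stepDiv_noop hc le_rfl
      intro h
      have := Int.le_of_dvd one_pos h
      omega
    simp only [List.foldl_cons, this]
    exact ih (fun c hc => h2 c (List.mem_cons_of_mem _ hc))

-- divisors ≥ 2 of a positive prime equal it
theorem eq_of_dvd_prime {q c : Int} (hq : Nat.Prime q.natAbs) (hqpos : 2 ≤ q)
    (hc : 2 ≤ c) (hdvd : c ∣ q) : c = q := by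
  have h1 : c.natAbs ∣ q.natAbs := Int.natAbs_dvd_natAbs.2 hdvd
  have := hq.eq_one_or_self_of_dvd c.natAbs h1
  omega

-- a positive prime q is not divided by any candidate ≠ q
theorem foldl_stepDiv_prime_noop {q : Int} (hq : Nat.Prime q.natAbs) (hqpos : 2 ≤ q)
    {C : List Int} (h2 : ∀ c ∈ C, 2 ≤ c ∧ c ≠ q) (acc : List (Int × Int)) :
    C.foldl stepDiv (acc, q) = (acc, q) := by
  induction C with
  | nil => rfl
  | cons c C ih =>
    obtain ⟨hc2, hcq⟩ := h2 c (List.mem_cons_self ..)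
    have : stepDiv (acc, q) c = (acc, q) := by
      apply stepDiv_noop hc2 (by omega)
      intro h
      exact hcq (eq_of_dvd_prime hq hqpos hc2 h)
    simp only [List.foldl_cons, this]
    exact ih (fun c hc => h2 c (List.mem_cons_of_mem _ hc))

-- running any sorted candidate list ≥ 2 on a positive prime state yields the factor (q,1) exactly
theorem finish_foldl_prime {q : Int} (hq : Nat.Prime q.natAbs) (hqpos : 2 ≤ q)
    {C : List Int} (hs : C.Pairwise (· < ·)) (h2 : ∀ c ∈ C, 2 ≤ c) (acc : List (Int × Int)) :
    pvFinish (C.foldl stepDiv (acc, q)) = acc ++ [(q, 1)] := by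
  by_cases hmem : q ∈ C
  · obtain ⟨l₁, l₂, rfl⟩ := List.append_of_mem hmem
    have hnd : (l₁ ++ q :: l₂).Nodup := hs.imp (fun h => ne_of_lt h)
    have hq1 : q ∉ l₁ := by
      intro h
      have := List.disjoint_of_nodup_append hnd h
      simp at this
    rw [List.foldl_append, foldl_stepDiv_prime_noop hq hqpos
      (fun c hc => ⟨h2 c (List.mem_append_left _ hc), fun h => hq1 (h ▸ hc)⟩) acc]
    rw [List.foldl_cons, stepDiv_self hqpos acc]
    rw [foldl_stepDiv_one (fun c hc => h2 c (by simp [hc]))]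
    unfold pvFinish
    simp
  · rw [foldl_stepDiv_prime_noop hq hqpos
      (fun c hc => ⟨h2 c hc, fun h => hmem (h ▸ hc)⟩) acc]
    unfold pvFinish
    simp [show (1:Int) < q by omega]

-- if every prime factor of n is ≥ p and p*p > n then n is 1 or prime
theorem one_or_prime {n p : Int} (hn : 1 ≤ n) (hp : 0 < p)
    (hmin : ∀ q : ℕ, q.Prime → (q : Int) ∣ n → p ≤ q) (hpp : n < p * p) :
    n = 1 ∨ Nat.Prime n.natAbs := by
  by_cases h1 : n = 1
  · exact Or.inl h1
  right
  by_contra hnp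
  have hge2 : 2 ≤ n.natAbs := by omega
  obtain ⟨q, hq, hqd⟩ := Nat.exists_prime_and_dvd (n := n.natAbs) (by omega)
  have hcast : ((n.natAbs : Nat) : Int) = n := Int.natAbs_of_nonneg (by omega)
  have hqdi : (q : Int) ∣ n := hcast ▸ Int.natCast_dvd_natCast.2 hqd
  have hqp : p ≤ (q : Int) := hmin q hq hqdi
  -- n / q is > 1 (else n = q would be prime), and has a prime factor ≥ p
  have hqpos : (0:Int) < q := by exact_mod_cast hq.pos
  have hnq1 : 1 ≤ n / q := by
    have := Int.ediv_mul_cancel hqdi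
    nlinarith [Int.ediv_nonneg (by omega : (0:Int) ≤ n) (by omega : (0:Int) ≤ (q:Int))]
  have hmul : n / q * q = n := Int.ediv_mul_cancel hqdi
  have hnq2 : n / q ≠ 1 := by
    intro h
    rw [h, one_mul] at hmul
    apply hnp
    rw [← hmul]
    simpa using hq
  obtain ⟨r, hr, hrd⟩ := Nat.exists_prime_and_dvd (n := (n / q).natAbs) (by omega)
  have hcast2 : (((n / (q:Int)).natAbs : Nat) : Int) = n / q := Int.natAbs_of_nonneg (by omega)
  have hrdi : (r : Int) ∣ n / q := hcast2 ▸ Int.natCast_dvd_natCast.2 hrd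
  have hrp : p ≤ (r : Int) := hmin r hr (hrdi.trans ⟨q, hmul.symm⟩)
  have hrle : (r : Int) ≤ n / q := Int.le_of_dvd (by omega) hrdi
  nlinarith

-- finishing directly equals finishing after running further candidates, once p*p > n
theorem finish_stop {n p : Int} (hn : 1 ≤ n)
    (hmin : ∀ q : ℕ, q.Prime → (q : Int) ∣ n → p ≤ q) (hpp : n < p * p) (hp : 0 < p)
    {C : List Int} (hs : C.Pairwise (· < ·)) (h2 : ∀ c ∈ C, 2 ≤ c) (acc : List (Int × Int)) :
    pvFinish (C.foldl stepDiv (acc, n)) = pvFinish (acc, n) := by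
  rcases one_or_prime hn hp hmin hpp with h1 | hpr
  · subst h1
    rw [foldl_stepDiv_one h2]
  · rw [finish_foldl_prime hpr (by
      have := hpr.two_le
      omega) hs h2 acc]
    unfold pvFinish
    have : 1 < n := by have := hpr.two_le; omega
    simp [this]

-- ---- isqrt ----

theorem isqrtLoop_spec {m : Int} (hm : 1 ≤ m) :
    ∀ (fuel : Nat) (r : Int), 0 ≤ r → r * r ≤ m → m ≤ r + fuel →
      r ≤ isqrtLoop m fuel r ∧ 0 ≤ isqrtLoop m fuel r ∧
        isqrtLoop m fuel r * isqrtLoop m fuel r ≤ m ∧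
        m < (isqrtLoop m fuel r + 1) * (isqrtLoop m fuel r + 1) := by
  intro fuel
  induction fuel with
  | zero =>
    intro r h0 h1 h2
    refine ⟨le_rfl, h0, ?_⟩
    unfold isqrtLoop
    constructor
    · exact h1
    · push_cast at h2 ⊢
      nlinarith
  | succ f ih =>
    intro r h0 h1 h2
    by_cases hc : (r + 1) * (r + 1) ≤ m
    · have hstep : isqrtLoop m (f+1) r = isqrtLoop m f (r+1) := by
        simp [isqrtLoop, hc]
      obtain ⟨a, b, c, d⟩ := ih (r+1) (by omega) hc (by push_cast at h2 ⊢; omega)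
      rw [hstep]
      exact ⟨by omega, b, c, d⟩
    · have hstep : isqrtLoop m (f+1) r = r := by
        simp [isqrtLoop, hc]
      rw [hstep]
      exact ⟨le_rfl, h0, h1, by omega⟩

theorem le_isqrtB_iff {m c : Int} (hm : 1 ≤ m) (hc : 0 ≤ c) :
    c ≤ isqrtB m ↔ c * c ≤ m := by
  obtain ⟨a, b, c, d⟩ := isqrtLoop_spec hm m.toNat 0 le_rfl (by simp; omega) (by omega)
  unfold isqrtB
  constructor
  · intro h
    exact le_trans (mul_le_mul h h hc a) c
  · intro h
    nlinarith

-- ---- primes > 3 are 6k±1 ----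

theorem prime_mod_six {q : ℕ} (hq : q.Prime) (h5 : 5 ≤ q) :
    (q : Int) % 6 = 1 ∨ (q : Int) % 6 = 5 := by
  have h2 : ¬ (2 ∣ q) := by
    intro h
    have := (Nat.prime_dvd_prime_iff_eq Nat.prime_two hq).1 h
    omega
  have h3 : ¬ (3 ∣ q) := by
    intro h
    have := (Nat.prime_dvd_prime_iff_eq Nat.prime_three hq).1 h
    omega
  have h2' : ¬ ((2:Int) ∣ (q:Int)) := fun h => h2 (Int.natCast_dvd_natCast.1 (by exact_mod_cast h))
  have h3' : ¬ ((3:Int) ∣ (q:Int)) := fun h => h3 (Int.natCast_dvd_natCast.1 (by exact_mod_cast h))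
  omega

-- ---- sieve: prime indices are never cleared ----

theorem markLoop_prime {q : ℕ} (hq : q.Prime) (bound : Int) {i : Int} (hi : 2 ≤ i) :
    ∀ (fuel : Nat) (j : Int) (arr : Array Bool), i ∣ j → i * i ≤ j →
      (markLoop bound i fuel j arr).getD q false = arr.getD q false := by
  intro fuel
  induction fuel with
  | zero => intro j arr _ _; rfl
  | succ f ih =>
    intro j arr hdvd hsq
    have h4 : 4 ≤ i * i := by nlinarith
    by_cases hj : j ≤ bound
    · have hstep : markLoop bound i (f+1) j arr =
          markLoop bound i f (j + i) (arr.set! j.toNat false) := by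
        simp [markLoop, hj]
      rw [hstep, ih (j + i) _ (Dvd.dvd.add hdvd dvd_rfl) (by omega)]
      have hne : j.toNat ≠ q := by
        intro h
        have hj0 : 0 < j := by omega
        have hjq : j = (q : Int) := by omega
        have hiq : i.toNat ∣ q := by
          have : (i.toNat : Int) ∣ (q : Int) := by
            rwa [Int.toNat_of_nonneg (by omega : (0:Int) ≤ i), ← hjq]
          exact_mod_cast this
        rcases hq.eq_one_or_self_of_dvd i.toNat hiq with h1 | h1
        · omega
        · -- i = q = j, but i * i ≤ j forces i ≤ 1
          have : i = j := by omega
          nlinarith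
      rw [Array.set!_eq_setIfInBounds, Array.getD_eq_getD_getElem?,
        Array.getD_eq_getD_getElem?, Array.getElem?_setIfInBounds, if_neg hne]
    · simp [markLoop, hj]

theorem sieveLoop_prime {q : ℕ} (hq : q.Prime) (bound : Int) :
    ∀ (fuel : Nat) (i : Int) (arr : Array Bool), 2 ≤ i →
      (sieveLoop bound fuel i arr).getD q false = arr.getD q false := by
  intro fuel
  induction fuel with
  | zero => intro i arr _; rfl
  | succ f ih =>
    intro i arr hi
    by_cases hc : i * i ≤ bound
    · have hstep : sieveLoop bound (f+1) i arr = sieveLoop bound f (i+1)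
          (if arr.getD i.toNat false then markLoop bound i (bound.toNat + 1) (i * i) arr
           else arr) := by
        simp [sieveLoop, hc]
      rw [hstep, ih (i+1) _ (by omega)]
      split
      · exact markLoop_prime hq bound hi (bound.toNat + 1) (i*i) arr (Dvd.intro i rfl) le_rfl
      · rfl
    · simp [sieveLoop, hc]

theorem mem_primes_upto_of_prime {q : ℕ} (hq : q.Prime) {bound : Int}
    (hle : (q : Int) ≤ bound) : (q : Int) ∈ primes_upto bound := by
  have h2 : 2 ≤ q := hq.two_le
  have hb : ¬ bound < 2 := by
    intro h
    have : (2:Int) ≤ (q:Int) := by exact_mod_cast h2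
    omega
  unfold primes_upto
  rw [if_neg hb]
  rw [List.mem_filter]
  constructor
  · rw [PySem.List.mem_pyRange_one]
    constructor
    · exact_mod_cast h2
    · omega
  · have hqs : (q:Int).toNat = q := by omega
    rw [hqs, sieveLoop_prime hq bound _ 2 _ le_rfl]
    have hlt : q < bound.toNat + 1 := by omega
    rw [Array.set!_eq_setIfInBounds, Array.set!_eq_setIfInBounds,
      Array.getD_eq_getD_getElem?, Array.getElem?_setIfInBounds, if_neg (by omega : (1:Nat) ≠ q),
      Array.getElem?_setIfInBounds, if_neg (by omega : (0:Nat) ≠ q)]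
    simp [hlt]

theorem mem_primes_upto_bounds {bound c : Int} (hc : c ∈ primes_upto bound) :
    2 ≤ c ∧ c ≤ bound := by
  unfold primes_upto at hc
  by_cases hb : bound < 2
  · rw [if_pos hb] at hc; cases hc
  · rw [if_neg hb] at hc
    have := (List.mem_filter.1 hc).1
    rw [PySem.List.mem_pyRange_one] at this
    omega

theorem pairwise_primes_upto (bound : Int) : (primes_upto bound).Pairwise (· < ·) := by
  unfold primes_upto
  split
  · exact List.Pairwise.nil
  · exact (PySem.List.pairwise_lt_pyRange_one 2 (bound+1)).filter _

-- ---- dropping composite candidates from a prime-complete sorted list ----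

theorem foldl_filter_prime {b : Int} :
    ∀ (C : List Int) (n : Int) (acc : List (Int × Int)), 1 ≤ n →
      C.Pairwise (· < ·) → (∀ c ∈ C, 2 ≤ c ∧ c ≤ b) →
      (∀ q : ℕ, q.Prime → (q : Int) ∣ n → (q : Int) ∈ C ∨ b < q) →
      C.foldl stepDiv (acc, n) =
        (C.filter (fun c => decide (Nat.Prime c.natAbs))).foldl stepDiv (acc, n) := by
  intro C
  induction C with
  | nil => intro n acc _ _ _ _; rfl
  | cons c C ih =>
    intro n acc hn hs hb hdvd
    have hc2 : 2 ≤ c := (hb c (List.mem_cons_self ..)).1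
    have hcb : c ≤ b := (hb c (List.mem_cons_self ..)).2
    have hstail := List.pairwise_cons.1 hs
    by_cases hcp : Nat.Prime c.natAbs
    · have hfil : (c :: C).filter (fun c => decide (Nat.Prime c.natAbs)) =
          c :: C.filter (fun c => decide (Nat.Prime c.natAbs)) := by
        simp [hcp]
      rw [hfil]
      simp only [List.foldl_cons]
      obtain ⟨ha, hd, hnd⟩ := stepDiv_spec hc2 hn acc
      rw [show stepDiv (acc, n) c = ((stepDiv (acc, n) c).1, (stepDiv (acc, n) c).2) from rfl]
      apply ih _ _ ha hstail.2 (fun x hx => hb x (List.mem_cons_of_mem _ hx))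
      intro q hqp hqd
      rcases hdvd q hqp (hqd.trans hd) with hmem | hlt
      · rcases List.mem_cons.1 hmem with heq | hmem'
        · exfalso; exact hnd (heq ▸ hqd)
        · exact Or.inl hmem'
      · exact Or.inr hlt
    · -- composite candidate never divides the state
      have hnotdvd : ¬ (c ∣ n) := by
        intro hcd
        obtain ⟨q, hqp, hqd⟩ := Nat.exists_prime_and_dvd (n := c.natAbs) (by omega)
        have hqc : (q : Int) ∣ c := by
          have : (q : Int) ∣ (c.natAbs : Int) := by exact_mod_cast hqd
          rwa [Int.natAbs_of_nonneg (by omega)] at this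
        have hqn : (q : Int) ∣ n := hqc.trans hcd
        have hqlec : (q : Int) ≤ c := Int.le_of_dvd (by omega) hqc
        have hqnec : (q : Int) ≠ c := by
          intro h
          apply hcp
          have : c.natAbs = q := by omega
          rwa [this]
        rcases hdvd q hqp hqn with hmem | hlt
        · rcases List.mem_cons.1 hmem with heq | hmem'
          · exact hqnec heq
          · have := hstail.1 _ hmem'
            omega
        · omega
      have hfil : (c :: C).filter (fun c => decide (Nat.Prime c.natAbs)) =
          C.filter (fun c => decide (Nat.Prime c.natAbs)) := by
        simp [hcp]
      rw [hfil]
      simp only [List.foldl_cons, stepDiv_noop hc2 hn hnotdvd]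
      apply ih _ _ hn hstail.2 (fun x hx => hb x (List.mem_cons_of_mem _ hx))
      intro q hqp hqd
      rcases hdvd q hqp hqd with hmem | hlt
      · rcases List.mem_cons.1 hmem with heq | hmem'
        · exfalso
          apply hcp
          have : c.natAbs = q := by
            have := hqp.two_le
            omega
          rwa [this]
        · exact Or.inl hmem'
      · exact Or.inr hlt

-- pulling the head off a sorted filter
theorem filter_le_sorted {l : List Int} (hs : l.Pairwise (· < ·)) {p : Int} (hp : p ∈ l) :
    l.filter (fun c => p ≤ c) = p :: l.filter (fun c => p < c) := by
  induction l with
  | nil => cases hp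
  | cons a l ih =>
    have hstail := List.pairwise_cons.1 hs
    rcases List.mem_cons.1 hp with rfl | hp'
    · have hcongr : l.filter (fun c => p ≤ c) = l.filter (fun c => p < c) :=
        List.filter_congr (fun c hc => by
          have := hstail.1 c hc
          simp only [decide_eq_decide]
          omega)
      simp [hcongr]
    · have hap : a < p := hstail.1 p hp'
      rw [List.filter_cons, List.filter_cons]
      simp only [show ¬ (p ≤ a) by omega, show ¬ (p < a) by omega, decide_false]
      exact ih hstail.2 hp'

-- ---- the A-side characterisation: dynamic wheel = fold over wheelCands ----

theorem wheel_eq_foldl {m limit : Int} (hm1 : 1 ≤ m) :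
    ∀ (fuel : Nat) (n p step : Int) (acc : List (Int × Int)),
      1 ≤ n → n ∣ m → 5 ≤ p →
      ((step = 2 ∧ p % 6 = 5) ∨ (step = 4 ∧ p % 6 = 1)) →
      (∀ q : ℕ, q.Prime → (q : Int) ∣ n → p ≤ q) →
      m.toNat ≤ 2 * fuel + p.toNat - 5 →
      pvFinish (wheelLoop limit fuel (acc, n) p step) =
        pvFinish (((wheelCands (min (isqrtB m) limit)).filter (fun c => p ≤ c)).foldl
          stepDiv (acc, n)) := by
  intro fuel
  induction fuel with
  | zero =>
    intro n p step acc hn hnm hp5 hstep hmin hfuel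
    have hnm' : n ≤ m := Int.le_of_dvd (by omega) hnm
    have hnp : n < p := by omega
    have hpp : n < p * p := by nlinarith
    exact (finish_stop hn hmin hpp (by omega)
      ((pairwise_wheelCands _).filter _)
      (fun c hc => by have := mem_wheelCands.1 (List.mem_of_mem_filter hc); omega) acc).symm
  | succ f ih =>
    intro n p step acc hn hnm hp5 hstep hmin hfuel
    have hnm' : n ≤ m := Int.le_of_dvd (by omega) hnm
    by_cases hcond : p * p ≤ n ∧ p ≤ limit
    · have hloop : wheelLoop limit (f+1) (acc, n) p step =
          wheelLoop limit f (stepDiv (acc, n) p) (p + step) (6 - step) := by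
        simp [wheelLoop, hcond]
      rw [hloop]
      have hpb : p ≤ min (isqrtB m) limit := by
        have : p ≤ isqrtB m := (le_isqrtB_iff hm1 (by omega)).2 (le_trans hcond.1 hnm')
        omega
      have hpw : p ∈ wheelCands (min (isqrtB m) limit) :=
        mem_wheelCands.2 ⟨hp5, hpb, by rcases hstep with ⟨_, h⟩ | ⟨_, h⟩ <;> omega⟩
      have hdec := filter_le_sorted (pairwise_wheelCands (min (isqrtB m) limit)) hpw
      have hcongr : (wheelCands (min (isqrtB m) limit)).filter (fun c => p < c) =
          (wheelCands (min (isqrtB m) limit)).filter (fun c => p + step ≤ c) :=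
        List.filter_congr (fun c hc => by
          have hcw := mem_wheelCands.1 hc
          simp only [decide_eq_decide]
          rcases hstep with ⟨h1, h2⟩ | ⟨h1, h2⟩ <;> rcases hcw.2.2 with h3 | h3 <;> omega)
      rw [hdec, hcongr]
      simp only [List.foldl_cons]
      obtain ⟨ha, hd, hnd⟩ := stepDiv_spec (by omega : (2:Int) ≤ p) hn acc
      rw [show stepDiv (acc, n) p = ((stepDiv (acc, n) p).1, (stepDiv (acc, n) p).2) from rfl]
      apply ih _ _ _ _ ha (hd.trans hnm) (by omega)
      · rcases hstep with ⟨h1, h2⟩ | ⟨h1, h2⟩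
        · right; constructor <;> omega
        · left; constructor <;> omega
      · intro q hqp hqd
        have hqn : (q : Int) ∣ n := hqd.trans hd
        have hqp' : p ≤ (q : Int) := hmin q hqp hqn
        have hqne : (q : Int) ≠ p := by
          intro h
          exact hnd (h ▸ hqd)
        have hq5 : 5 ≤ q := by omega
        have hq6 := prime_mod_six hqp hq5
        rcases hstep with ⟨h1, h2⟩ | ⟨h1, h2⟩ <;> rcases hq6 with h3 | h3 <;> omega
      · omega
    · have hloop : wheelLoop limit (f+1) (acc, n) p step = (acc, n) := by
        simp only [wheelLoop]
        rw [if_neg hcond]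
      rw [hloop]
      rcases not_and_or.1 hcond with h | h
      · have hpp : n < p * p := by omega
        exact (finish_stop hn hmin hpp (by omega)
          ((pairwise_wheelCands _).filter _)
          (fun c hc => by have := mem_wheelCands.1 (List.mem_of_mem_filter hc); omega) acc).symm
      · have hfe : (wheelCands (min (isqrtB m) limit)).filter (fun c => p ≤ c) = [] := by
          rw [List.filter_eq_nil_iff]
          intro c hc
          have := mem_wheelCands.1 hc
          simp only [decide_eq_true_eq]
          omega
        rw [hfe]
        rfl

-- B's guarded fold over the sieve list is a fold over its entries ≥ 5
theorem foldl_guard (C : List Int) :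
    ∀ (s : List (Int × Int) × Int),
      C.foldl (fun s p => if p < 5 then s else stepDiv s p) s =
        (C.filter (fun p => decide (5 ≤ p))).foldl stepDiv s := by
  induction C with
  | nil => intro s; rfl
  | cons c C ih =>
    intro s
    by_cases hc : c < 5
    · rw [List.foldl_cons, if_pos hc, List.filter_cons,
        show (decide (5 ≤ c)) = false by simp; omega]
      exact ih s
    · rw [List.foldl_cons, if_neg hc, List.filter_cons,
        show (decide (5 ≤ c)) = true by simp; omega, if_pos rfl, List.foldl_cons]
      exact ih (stepDiv s c)

-- the wheel candidates and the sieve entries ≥ 5 thin to the same prime list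
theorem primeList_eq (b : Int) :
    (wheelCands b).filter (fun c => decide (Nat.Prime c.natAbs)) =
      ((primes_upto b).filter (fun p => decide (5 ≤ p))).filter
        (fun c => decide (Nat.Prime c.natAbs)) := by
  have s1 : ((wheelCands b).filter (fun c => decide (Nat.Prime c.natAbs))).Pairwise (· < ·) :=
    (pairwise_wheelCands b).filter _
  have s2 : (((primes_upto b).filter (fun p => decide (5 ≤ p))).filter
      (fun c => decide (Nat.Prime c.natAbs))).Pairwise (· < ·) :=
    ((pairwise_primes_upto b).filter _).filter _
  have hmem : ∀ x : Int,
      (x ∈ (wheelCands b).filter (fun c => decide (Nat.Prime c.natAbs)) ↔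
        x ∈ ((primes_upto b).filter (fun p => decide (5 ≤ p))).filter
          (fun c => decide (Nat.Prime c.natAbs))) := by
    intro x
    have hchar1 : x ∈ (wheelCands b).filter (fun c => decide (Nat.Prime c.natAbs)) ↔
        (Nat.Prime x.natAbs ∧ 5 ≤ x ∧ x ≤ b) := by
      rw [List.mem_filter]
      constructor
      · rintro ⟨hw, hp⟩
        have := mem_wheelCands.1 hw
        exact ⟨by simpa using hp, this.1, this.2.1⟩
      · rintro ⟨hp, h5, hb⟩
        have hcast : ((x.natAbs : ℕ) : Int) = x := Int.natAbs_of_nonneg (by omega)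
        have h6 := prime_mod_six hp (by omega)
        rw [hcast] at h6
        exact ⟨mem_wheelCands.2 ⟨h5, hb, h6⟩, by simpa using hp⟩
    have hchar2 : x ∈ ((primes_upto b).filter (fun p => decide (5 ≤ p))).filter
        (fun c => decide (Nat.Prime c.natAbs)) ↔ (Nat.Prime x.natAbs ∧ 5 ≤ x ∧ x ≤ b) := by
      rw [List.mem_filter, List.mem_filter]
      constructor
      · rintro ⟨⟨hm, h5⟩, hp⟩
        exact ⟨by simpa using hp, by simpa using h5, (mem_primes_upto_bounds hm).2⟩
      · rintro ⟨hp, h5, hb⟩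
        have hcast : ((x.natAbs : ℕ) : Int) = x := Int.natAbs_of_nonneg (by omega)
        refine ⟨⟨?_, by simpa using h5⟩, by simpa using hp⟩
        have := mem_primes_upto_of_prime hp (bound := b) (by omega)
        rwa [hcast] at this
    rw [hchar1, hchar2]
  exact ((List.perm_ext_iff_of_nodup (s1.imp ne_of_lt) (s2.imp ne_of_lt)).2 hmem).eq_of_pairwise
    (fun a b _ _ h1 h2 => by omega) s1 s2

-- every prime factor of a number coprime to 6 is at least 5
theorem five_le_prime_factor {m : Int} (hm2 : ¬ (2 ∣ m)) (hm3 : ¬ (3 ∣ m)) :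
    ∀ q : ℕ, q.Prime → (q : Int) ∣ m → (5 : Int) ≤ q := by
  intro q hq hqd
  by_contra hlt
  have h2 := hq.two_le
  have : q = 2 ∨ q = 3 ∨ q = 4 := by
    omega
  rcases this with rfl | rfl | rfl
  · exact hm2 (by exact_mod_cast hqd)
  · exact hm3 (by exact_mod_cast hqd)
  · exact absurd hq (by decide)

-- ===== VERDICT (by name: the statement is the Claim_ definition above) =====
theorem trial_factor_spec : Claim_equal_trial_factor := by
  unfold Claim_equal_trial_factor
  intro n limit _
  unfold Spec_trial_factor trial_factor trial_factor_alt
  by_cases h1 : n ≤ 1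
  · rw [if_pos h1, if_pos h1]
  · rw [if_neg h1, if_neg h1]
    -- the two programs share the 2-3 preamble; name its state
    obtain ⟨ha2, hd2, hnd2⟩ := stepDiv_spec (by omega : (2:Int) ≤ 2) (by omega : 1 ≤ n) ([] : List (Int × Int))
    obtain ⟨ha3, hd3, hnd3⟩ := stepDiv_spec (by omega : (2:Int) ≤ 3) ha2 (stepDiv ([], n) 2).1
    have hpre : [(2:Int), 3].foldl stepDiv ([], n) = stepDiv (stepDiv ([], n) 2) 3 := rfl
    set s0 := [(2:Int), 3].foldl stepDiv ([], n) with hs0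
    have hs0eq : s0 = stepDiv ((stepDiv ([], n) 2).1, (stepDiv ([], n) 2).2) 3 := hpre
    have hm1 : 1 ≤ s0.2 := by rw [hs0eq]; exact ha3
    have hm3 : ¬ (3 ∣ s0.2) := by rw [hs0eq]; exact hnd3
    have hm2 : ¬ (2 ∣ s0.2) := by
      intro h
      apply hnd2
      have : s0.2 ∣ (stepDiv ([], n) 2).2 := by rw [hs0eq]; exact hd3
      exact h.trans this
    have hmin5 := five_le_prime_factor hm2 hm3
    -- A side: dynamic wheel = fold over the thinned wheel candidates
    have hA : pvFinish (wheelLoop limit (s0.2.toNat + 1) (s0.1, s0.2) 5 2) =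
        pvFinish (((wheelCands (min (isqrtB s0.2) limit)).filter
          (fun c => decide ((5:Int) ≤ c))).foldl stepDiv (s0.1, s0.2)) :=
      wheel_eq_foldl hm1 (s0.2.toNat + 1) s0.2 5 2 s0.1 hm1 dvd_rfl (by omega)
        (Or.inl ⟨rfl, by norm_num⟩) (hmin5) (by omega)
    have hWfull : (wheelCands (min (isqrtB s0.2) limit)).filter (fun c => decide ((5:Int) ≤ c)) =
        wheelCands (min (isqrtB s0.2) limit) := by
      apply List.filter_eq_self.2
      intro c hc
      have := mem_wheelCands.1 hc
      simp only [decide_eq_true_eq]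
      omega
    -- thin both candidate lists to the primes via foldl_filter_prime
    have hdvdW : ∀ q : ℕ, q.Prime → (q : Int) ∣ s0.2 →
        (q : Int) ∈ wheelCands (min (isqrtB s0.2) limit) ∨ min (isqrtB s0.2) limit < q := by
      intro q hq hqd
      by_cases hqb : (q : Int) ≤ min (isqrtB s0.2) limit
      · left
        exact mem_wheelCands.2 ⟨hmin5 q hq hqd, hqb, prime_mod_six hq (by
          have := hmin5 q hq hqd; omega)⟩
      · right; omega
    have hEW := foldl_filter_prime (b := min (isqrtB s0.2) limit)
      (wheelCands (min (isqrtB s0.2) limit)) s0.2 s0.1 hm1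
      (pairwise_wheelCands _)
      (fun c hc => by have := mem_wheelCands.1 hc; omega) hdvdW
    have hdvdL : ∀ q : ℕ, q.Prime → (q : Int) ∣ s0.2 →
        (q : Int) ∈ (primes_upto (min (isqrtB s0.2) limit)).filter
          (fun p => decide ((5:Int) ≤ p)) ∨ min (isqrtB s0.2) limit < q := by
      intro q hq hqd
      by_cases hqb : (q : Int) ≤ min (isqrtB s0.2) limit
      · left
        rw [List.mem_filter]
        exact ⟨mem_primes_upto_of_prime hq hqb, by
          simp only [decide_eq_true_eq]; exact hmin5 q hq hqd⟩
      · right; omega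
    have hEL := foldl_filter_prime (b := min (isqrtB s0.2) limit)
      ((primes_upto (min (isqrtB s0.2) limit)).filter (fun p => decide ((5:Int) ≤ p)))
      s0.2 s0.1 hm1
      ((pairwise_primes_upto _).filter _)
      (fun c hc => by
        have h5 := (List.mem_filter.1 hc).2
        have hb := mem_primes_upto_bounds (List.mem_filter.1 hc).1
        simp only [decide_eq_true_eq] at h5
        omega) hdvdL
    -- B side: remove the p < 5 guard
    have hB := foldl_guard (primes_upto (min (isqrtB s0.2) limit)) (s0.1, s0.2)
    -- assemble
    show pvFinish (wheelLoop limit (s0.2.toNat + 1) s0 5 2) =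
      pvFinish ((primes_upto (min (isqrtB s0.2) limit)).foldl
        (fun s p => if p < 5 then s else stepDiv s p) s0)
    calc pvFinish (wheelLoop limit (s0.2.toNat + 1) s0 5 2)
        = pvFinish (wheelLoop limit (s0.2.toNat + 1) (s0.1, s0.2) 5 2) := rfl
      _ = pvFinish (((wheelCands (min (isqrtB s0.2) limit)).filter
            (fun c => decide ((5:Int) ≤ c))).foldl stepDiv (s0.1, s0.2)) := hA
      _ = pvFinish ((wheelCands (min (isqrtB s0.2) limit)).foldl stepDiv (s0.1, s0.2)) := by
            rw [hWfull]
      _ = pvFinish (((wheelCands (min (isqrtB s0.2) limit)).filter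
            (fun c => decide (Nat.Prime c.natAbs))).foldl stepDiv (s0.1, s0.2)) := by
            rw [← hEW]
      _ = pvFinish ((((primes_upto (min (isqrtB s0.2) limit)).filter
            (fun p => decide ((5:Int) ≤ p))).filter
              (fun c => decide (Nat.Prime c.natAbs))).foldl stepDiv (s0.1, s0.2)) := by
            rw [primeList_eq]
      _ = pvFinish (((primes_upto (min (isqrtB s0.2) limit)).filter
            (fun p => decide ((5:Int) ≤ p))).foldl stepDiv (s0.1, s0.2)) := by
            rw [← hEL]
      _ = pvFinish ((primes_upto (min (isqrtB s0.2) limit)).foldl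
            (fun s p => if p < 5 then s else stepDiv s p) (s0.1, s0.2)) := by
            rw [hB]
      _ = pvFinish ((primes_upto (min (isqrtB s0.2) limit)).foldl
            (fun s p => if p < 5 then s else stepDiv s p) s0) := rfl
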